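-- pv_equiv track=rewrite | github.com/kdfwow64/Django-Chatbot | features/text_processing.py | get_full_match
-- ===== SOURCE A (Python) =====
-- def ngram(n, l):
--   out = []
--   for i in range(len(l)-n+1):
--     temp_string = " ".join(l[i:i+n])
--     out.append(temp_string)
--   return out
--
-- def get_full_match(wl, l2m):
--   """takes in a list(of strings), and another list called l2m,
--   and if something from l2m is in list, then we return True or False if list matches l2m exactly"""
--   n = len(wl)
--   output = []
--   for C in range(n, 0, -1):
--     grams = ngram(C, wl)
--     for i in l2m:
--       if i in grams:
--         output.append(i)
--   return output == l2m
-- ===== SOURCE B (Python) =====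
-- def get_full_match(wl, l2m):
--     # Build once: window-join string -> set of window lengths that produce it.
--     lens = {}
--     n = len(wl)
--     for i in range(n):
--         for C in range(1, n - i + 1):
--             lens.setdefault(" ".join(wl[i:i+C]), set()).add(C)
--     trips = []
--     for idx, item in enumerate(l2m):
--         for C in lens.get(item, set()):
--             trips.append((C, idx, item))
--     trips.sort(key=lambda t: (-t[0], t[1]))
--     return [t[2] for t in trips] == l2m
-- ===== Notes on version B (the rewrite author's own statement) =====
-- stated objective: faster
-- what changed: Instead of regenerating all n-grams for every window size C and linearly scanning them for each l2m item, B builds once a hash map from each contiguous-window join string to the set of window lengths producing it, then collects (C, index, item) triples by O(1) lookups and assembles A's output order with one stable sort on (-C, index).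
import Mathlib
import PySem

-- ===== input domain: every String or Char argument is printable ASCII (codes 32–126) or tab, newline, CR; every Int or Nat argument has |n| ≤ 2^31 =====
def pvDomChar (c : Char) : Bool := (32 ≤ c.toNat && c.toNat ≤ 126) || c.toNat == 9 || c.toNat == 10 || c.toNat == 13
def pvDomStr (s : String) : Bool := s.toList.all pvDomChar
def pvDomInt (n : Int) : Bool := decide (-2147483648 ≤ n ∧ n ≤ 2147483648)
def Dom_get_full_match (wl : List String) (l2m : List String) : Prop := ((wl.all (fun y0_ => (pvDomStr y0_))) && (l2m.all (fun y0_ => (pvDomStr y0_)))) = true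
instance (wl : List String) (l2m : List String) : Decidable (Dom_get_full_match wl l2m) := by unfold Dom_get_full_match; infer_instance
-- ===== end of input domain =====

-- B replaces A's per-size n-gram regeneration and linear scans by a window-join index built once plus a stable sort on (-length, index); equivalence of the RETURN value is proved for all inputs.

-- ===== PORT A =====
def ngram_port (n : Int) (l : List String) : List String :=
  (PySem.List.pyRange 0 ((l.length : Int) - n + 1)).foldl
    (fun out i => out ++ [PySem.Str.join " " (PySem.List.slice l (some i) (some (i + n)))]) []

def get_full_match (wl : List String) (l2m : List String) : Bool :=
  let n : Int := (wl.length : Int)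
  let output : List String :=
    (PySem.List.pyRange n 0 (-1)).foldl
      (fun output C =>
        let grams := ngram_port C wl
        l2m.foldl (fun output i => if grams.contains i then output ++ [i] else output) output)
      []
  output == l2m

-- ===== PORT B =====
-- lens.setdefault(s, set()).add(C)
def pvSetdefaultAdd (d : PySem.Dict String (PySem.Set Int)) (s : String) (C : Int) :
    PySem.Dict String (PySem.Set Int) :=
  d.insert s (PySem.Set.add (d.getD s PySem.Set.empty) C)

def get_full_match_alt (wl : List String) (l2m : List String) : Bool :=
  let n : Int := (wl.length : Int)
  let lens : PySem.Dict String (PySem.Set Int) :=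
    (PySem.List.pyRange 0 n).foldl
      (fun d i =>
        (PySem.List.pyRange 1 (n - i + 1)).foldl
          (fun d C =>
            pvSetdefaultAdd d (PySem.Str.join " " (PySem.List.slice wl (some i) (some (i + C)))) C)
          d)
      PySem.Dict.empty
  let trips : List (Int × Int × String) :=
    (PySem.List.enumerate l2m).foldl
      (fun tr p =>
        (PySem.Dict.getD lens p.2 PySem.Set.empty).foldl (fun tr C => tr ++ [(C, p.1, p.2)]) tr)
      []
  let sortedT := PySem.List.sorted2 trips (fun t => -t.1) (fun t => t.2.1)
  (sortedT.map (fun t => t.2.2)) == l2m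

-- ===== PRECONDITION & SPEC =====
def Spec_get_full_match (wl : List String) (l2m : List String) (out : Bool) : Prop := out = get_full_match_alt wl l2m
instance (wl : List String) (l2m : List String) (out : Bool) : Decidable (Spec_get_full_match wl l2m out) := by unfold Spec_get_full_match; infer_instance

-- ===== CLAIM (what is proved, stated in full; the proofs are below) =====
def Claim_equal_get_full_match : Prop := ∀ (wl : List String) (l2m : List String), Dom_get_full_match wl l2m → Spec_get_full_match wl l2m (get_full_match wl l2m)

-- ===== LEMMAS AND PROOFS =====

-- the join of the window of wl of length C starting at i
theorem pv_range_natCast (a b : Nat) :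
    PySem.List.pyRange (a : Int) (b : Int) = (List.range (b - a)).map (fun k => ((a + k : Nat) : Int)) := by
  unfold PySem.List.pyRange
  simp only [if_neg one_ne_zero, if_pos zero_lt_one]
  split_ifs with h
  · have hab : a ≤ b := by exact_mod_cast le_of_lt h
    have hc : (((b : Int) - a + 1 - 1) / 1).toNat = b - a := by omega
    rw [show ((b : Int) - a + 1 - 1) / 1 = (b : Int) - a by ring_nf; exact Int.ediv_one _]
    rw [show ((b : Int) - a).toNat = b - a by omega]
    apply List.map_congr_left
    intro k hk
    push_cast
    ring
  · have hba : b - a = 0 := by omega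
    rw [hba]
    simp

theorem pv_range_down (n : Nat) :
    PySem.List.pyRange (n : Int) 0 (-1) = (List.range n).map (fun k => ((n - k : Nat) : Int)) := by
  unfold PySem.List.pyRange
  simp only [if_neg (by norm_num : (-1 : Int) ≠ 0), if_neg (by norm_num : ¬(0:Int) < -1)]
  split_ifs with h
  · have hn : 0 < n := by exact_mod_cast h
    rw [show ((n : Int) - 0 + - -1 - 1) / - -1 = (n : Int) by ring_nf; exact Int.ediv_one _]
    rw [show ((n : Int)).toNat = n by omega]
    apply List.map_congr_left
    intro k hk
    simp only [List.mem_range] at hk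
    push_cast [Nat.cast_sub (le_of_lt hk)]
    ring
  · have hn : n = 0 := by omega
    subst hn
    simp


def pvWj (wl : List String) (i C : Nat) : String := PySem.Str.join " " ((wl.drop i).take C)

theorem pv_ngram_eq (wl : List String) (C : Nat) (h : C ≤ wl.length) :
    ngram_port (C : Int) wl = (List.range (wl.length - C + 1)).map (fun i => pvWj wl i C) := by
  unfold ngram_port
  have hm : (wl.length : Int) - C + 1 = ((wl.length - C + 1 : Nat) : Int) := by push_cast [Nat.cast_sub h]; ring
  rw [hm, show (0 : Int) = ((0 : Nat) : Int) by norm_num, pv_range_natCast, Nat.sub_zero, List.foldl_map,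
    PySem.List.foldl_append_singleton_eq_map]
  simp only [List.nil_append]
  apply List.map_congr_left
  intro k hk
  simp only [zero_add]
  rw [PySem.List.slice_natCast_add]
  rfl

theorem pv_mem_ngram (wl : List String) (C : Nat) (h : C ≤ wl.length) (s : String) :
    s ∈ ngram_port (C : Int) wl ↔ ∃ i : Nat, i + C ≤ wl.length ∧ s = pvWj wl i C := by
  rw [pv_ngram_eq wl C h]
  simp only [List.mem_map, List.mem_range]
  constructor
  · rintro ⟨i, hi, rfl⟩; exact ⟨i, by omega, rfl⟩
  · rintro ⟨i, hi, rfl⟩; exact ⟨i, by omega, rfl⟩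


def pvLens (wl : List String) : PySem.Dict String (PySem.Set Int) :=
  (List.range wl.length).foldl
    (fun d i =>
      (List.range (wl.length - i)).foldl
        (fun d k => pvSetdefaultAdd d (pvWj wl i (1 + k)) ((1 + k : Nat) : Int)) d)
    PySem.Dict.empty


theorem pv_range_one (b : Nat) :
    PySem.List.pyRange 1 (b : Int) = (List.range (b - 1)).map (fun k => ((1 + k : Nat) : Int)) := by
  rw [show (1 : Int) = ((1 : Nat) : Int) by norm_num]
  exact pv_range_natCast 1 b

theorem pv_lens_port_eq (wl : List String) :
    (PySem.List.pyRange 0 (wl.length : Int)).foldl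
      (fun d i =>
        (PySem.List.pyRange 1 ((wl.length : Int) - i + 1)).foldl
          (fun d C =>
            pvSetdefaultAdd d (PySem.Str.join " " (PySem.List.slice wl (some i) (some (i + C)))) C)
          d)
      PySem.Dict.empty = pvLens wl := by
  rw [show (0 : Int) = ((0 : Nat) : Int) by norm_num, pv_range_natCast, Nat.sub_zero, List.foldl_map]
  unfold pvLens
  apply PySem.List.foldl_congr_mem
  intro d i hi
  simp only [List.mem_range] at hi
  simp only [Nat.zero_add]
  have hm : (wl.length : Int) - (i : Int) + 1 = ((wl.length - i + 1 : Nat) : Int) := by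
    push_cast [Nat.cast_sub (le_of_lt hi)]; ring
  rw [hm, pv_range_one, Nat.add_sub_cancel, List.foldl_map]
  apply PySem.List.foldl_congr_mem
  intro d' k hk
  rw [PySem.List.slice_natCast_add wl i (1 + k)]
  rfl

theorem pv_mem_setdefaultAdd (d : PySem.Dict String (PySem.Set Int)) (s t : String) (C x : Int) :
    x ∈ (pvSetdefaultAdd d s C).getD t PySem.Set.empty ↔
      (t = s ∧ x = C) ∨ x ∈ d.getD t PySem.Set.empty := by
  unfold pvSetdefaultAdd
  rw [PySem.Dict.getD_insert]
  split_ifs with h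
  · subst h
    rw [PySem.Set.mem_add]
    tauto
  · tauto

theorem pv_nodup_setdefaultAdd (d : PySem.Dict String (PySem.Set Int)) (s t : String) (C : Int)
    (hs : (d.getD s PySem.Set.empty).Nodup) (h : (d.getD t PySem.Set.empty).Nodup) :
    ((pvSetdefaultAdd d s C).getD t PySem.Set.empty).Nodup := by
  unfold pvSetdefaultAdd
  rw [PySem.Dict.getD_insert]
  split_ifs with he
  · exact PySem.Set.nodup_add _ _ hs
  · exact h

def pvInnerF (wl : List String) (i m : Nat) (d : PySem.Dict String (PySem.Set Int)) :
    PySem.Dict String (PySem.Set Int) :=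
  (List.range m).foldl (fun d k => pvSetdefaultAdd d (pvWj wl i (1 + k)) ((1 + k : Nat) : Int)) d

theorem pv_mem_innerF (wl : List String) (i m : Nat) (d : PySem.Dict String (PySem.Set Int))
    (t : String) (x : Int) :
    x ∈ (pvInnerF wl i m d).getD t PySem.Set.empty ↔
      (∃ C : Nat, 1 ≤ C ∧ C ≤ m ∧ x = (C : Int) ∧ t = pvWj wl i C) ∨ x ∈ d.getD t PySem.Set.empty := by
  induction m with
  | zero => simp [pvInnerF]
  | succ m ih =>
    unfold pvInnerF at *
    rw [List.range_succ, List.foldl_append, List.foldl_cons, List.foldl_nil,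
      pv_mem_setdefaultAdd, ih]
    constructor
    · rintro (⟨rfl, rfl⟩ | ⟨⟨C, h1, h2, rfl, rfl⟩ | hx⟩)
      · exact Or.inl ⟨1 + m, by omega, by omega, rfl, rfl⟩
      · exact Or.inl ⟨C, h1, by omega, rfl, rfl⟩
      · exact Or.inr hx
    · rintro (⟨C, h1, h2, rfl, rfl⟩ | hx)
      · by_cases hC : C ≤ m
        · exact Or.inr (Or.inl ⟨C, h1, hC, rfl, rfl⟩)
        · have : C = 1 + m := by omega
          subst this
          exact Or.inl ⟨rfl, rfl⟩
      · exact Or.inr (Or.inr hx)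

theorem pv_nodup_innerF (wl : List String) (i m : Nat) (d : PySem.Dict String (PySem.Set Int))
    (h : ∀ t, (d.getD t PySem.Set.empty).Nodup) :
    ∀ t, ((pvInnerF wl i m d).getD t PySem.Set.empty).Nodup := by
  induction m with
  | zero => simpa [pvInnerF] using h
  | succ m ih =>
    intro t
    unfold pvInnerF at *
    rw [List.range_succ, List.foldl_append, List.foldl_cons, List.foldl_nil]
    exact pv_nodup_setdefaultAdd _ _ _ _ (ih _) (ih _)

def pvOuterF (wl : List String) (N : Nat) (d : PySem.Dict String (PySem.Set Int)) :
    PySem.Dict String (PySem.Set Int) :=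
  (List.range N).foldl (fun d i => pvInnerF wl i (wl.length - i) d) d

theorem pv_mem_outerF (wl : List String) (N : Nat) (d : PySem.Dict String (PySem.Set Int))
    (t : String) (x : Int) :
    x ∈ (pvOuterF wl N d).getD t PySem.Set.empty ↔
      (∃ i C : Nat, i < N ∧ 1 ≤ C ∧ C ≤ wl.length - i ∧ x = (C : Int) ∧ t = pvWj wl i C) ∨
        x ∈ d.getD t PySem.Set.empty := by
  induction N with
  | zero => simp [pvOuterF]
  | succ N ih =>
    unfold pvOuterF at *
    rw [List.range_succ, List.foldl_append, List.foldl_cons, List.foldl_nil, pv_mem_innerF, ih]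
    constructor
    · rintro (⟨C, h1, h2, rfl, rfl⟩ | ⟨i, C, hi, h1, h2, rfl, rfl⟩ | hx)
      · exact Or.inl ⟨N, C, by omega, h1, h2, rfl, rfl⟩
      · exact Or.inl ⟨i, C, by omega, h1, h2, rfl, rfl⟩
      · exact Or.inr hx
    · rintro (⟨i, C, hi, h1, h2, rfl, rfl⟩ | hx)
      · by_cases hiN : i < N
        · exact Or.inr (Or.inl ⟨i, C, hiN, h1, h2, rfl, rfl⟩)
        · have : i = N := by omega
          subst this
          exact Or.inl ⟨C, h1, h2, rfl, rfl⟩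
      · exact Or.inr (Or.inr hx)

theorem pv_mem_lens (wl : List String) (t : String) (x : Int) :
    x ∈ (pvLens wl).getD t PySem.Set.empty ↔
      ∃ i C : Nat, 1 ≤ C ∧ i + C ≤ wl.length ∧ x = (C : Int) ∧ t = pvWj wl i C := by
  have hl : pvLens wl = pvOuterF wl wl.length PySem.Dict.empty := rfl
  rw [hl, pv_mem_outerF]
  have hemp : (PySem.Dict.empty.getD t PySem.Set.empty : PySem.Set Int) = [] := rfl
  rw [hemp]
  simp only [List.not_mem_nil, or_false]
  constructor
  · rintro ⟨i, C, hi, h1, h2, rfl, rfl⟩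
    exact ⟨i, C, h1, by omega, rfl, rfl⟩
  · rintro ⟨i, C, h1, h2, rfl, rfl⟩
    exact ⟨i, C, by omega, h1, by omega, rfl, rfl⟩

theorem pv_nodup_lens (wl : List String) (t : String) :
    ((pvLens wl).getD t PySem.Set.empty).Nodup := by
  have hl : pvLens wl = pvOuterF wl wl.length PySem.Dict.empty := rfl
  rw [hl]
  unfold pvOuterF
  suffices h : ∀ (N : Nat) (d : PySem.Dict String (PySem.Set Int)),
      (∀ t, (d.getD t PySem.Set.empty).Nodup) →
      ∀ t, (((List.range N).foldl (fun d i => pvInnerF wl i (wl.length - i) d) d).getD t PySem.Set.empty).Nodup by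
    exact h wl.length PySem.Dict.empty (fun t => List.nodup_nil) t
  intro N
  induction N with
  | zero => intro d hd t; simpa using hd t
  | succ N ih =>
    intro d hd t
    rw [List.range_succ, List.foldl_append, List.foldl_cons, List.foldl_nil]
    exact pv_nodup_innerF wl N _ _ (fun t => ih d hd t) t

theorem pv_sorted2_eq_sorted {α : Type} (xs : List α) (k1 k2 : α → Int) :
    PySem.List.sorted2 xs k1 k2 = PySem.List.sorted xs (fun x => toLex (k1 x, k2 x)) := by
  rw [PySem.List.sorted_eq_foldl_insertBy]
  unfold PySem.List.sorted2
  have hb : (fun (a b : α) => decide (k1 a < k1 b) || (!decide (k1 b < k1 a) && decide (k2 a < k2 b)))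
      = fun a b => decide ((fun x => toLex (k1 x, k2 x)) a < (fun x => toLex (k1 x, k2 x)) b) := by
    funext a b
    rw [Bool.eq_iff_iff]
    simp only [Bool.or_eq_true, Bool.and_eq_true, Bool.not_eq_true', decide_eq_true_eq,
      decide_eq_false_iff_not, Prod.Lex.lt_iff, ofLex_toLex]
    omega
  simp only [if_neg (by decide : ¬ (false = true)), hb]


def pvAout (wl l2m : List String) : List String :=
  (List.range wl.length).flatMap (fun k =>
    List.filter (fun s => (ngram_port ((wl.length - k : Nat) : Int) wl).contains s) l2m)

theorem pv_A_out (wl l2m : List String) : get_full_match wl l2m = (pvAout wl l2m == l2m) := by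
  simp only [get_full_match]
  rw [pv_range_down, List.foldl_map]
  rw [show (fun (x : List String) (y : Nat) =>
        List.foldl (fun output i =>
          if (ngram_port ((wl.length - y : Nat) : Int) wl).contains i = true then output ++ [i] else output) x l2m)
      = (fun (x : List String) (y : Nat) =>
          x ++ l2m.filter (fun s => (ngram_port ((wl.length - y : Nat) : Int) wl).contains s)) from
    funext fun x => funext fun y => PySem.List.foldl_append_if_eq_filter _ _ _]
  rw [PySem.List.foldl_append_eq_flatMap]
  rfl


def pvTrips (wl l2m : List String) : List (Int × Int × String) :=
  (PySem.List.enumerate l2m).flatMap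
    (fun p => ((pvLens wl).getD p.2 PySem.Set.empty).map (fun C => (C, p.1, p.2)))

theorem pv_B_out (wl l2m : List String) :
    get_full_match_alt wl l2m =
      ((PySem.List.sorted2 (pvTrips wl l2m) (fun t => -t.1) (fun t => t.2.1)).map
        (fun t => t.2.2) == l2m) := by
  simp only [get_full_match_alt]
  rw [pv_lens_port_eq]
  rw [show (fun (tr : List (Int × Int × String)) (p : Int × String) =>
        ((pvLens wl).getD p.2 PySem.Set.empty).foldl (fun tr C => tr ++ [(C, p.1, p.2)]) tr)
      = (fun (tr : List (Int × Int × String)) (p : Int × String) =>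
          tr ++ ((pvLens wl).getD p.2 PySem.Set.empty).map (fun C => (C, p.1, p.2))) from
    funext fun tr => funext fun p => PySem.List.foldl_append_singleton_eq_map _ _ _]
  rw [PySem.List.foldl_append_eq_flatMap]
  rfl

theorem pv_filter_map_eq_flatMap {α β : Type} (l : List α) (q : α → Bool) (f : α → β) :
    (l.filter q).map f = l.flatMap (fun x => if q x then [f x] else []) := by
  induction l with
  | nil => rfl
  | cons x t ih =>
    rw [List.flatMap_cons, List.filter_cons]
    by_cases hq : q x
    · simp only [hq, ite_true, List.map_cons, List.singleton_append, ih]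
    · simp only [hq, Bool.false_eq_true, ite_false, List.nil_append, ih]

theorem pv_enum_filter_map (xs : List String) (q : String → Bool) (s : Int) :
    ((PySem.List.enumerate xs s).filter (fun p => q p.2)).map (fun p => p.2) = xs.filter q := by
  induction xs generalizing s with
  | nil => rfl
  | cons x t ih =>
    rw [PySem.List.enumerate_cons, List.filter_cons, List.filter_cons]
    by_cases hq : q x
    · simp only [hq, ite_true, List.map_cons, ih]
    · simp only [hq, Bool.false_eq_true, ite_false, ih]

def pvT (wl l2m : List String) : List (Int × Int × String) :=
  (List.range wl.length).flatMap (fun k =>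
    ((PySem.List.enumerate l2m).filter
        (fun p => (ngram_port ((wl.length - k : Nat) : Int) wl).contains p.2)).map
      (fun p => (((wl.length - k : Nat) : Int), p.1, p.2)))

theorem pv_T_map (wl l2m : List String) : (pvT wl l2m).map (fun t => t.2.2) = pvAout wl l2m := by
  unfold pvT pvAout
  rw [List.map_flatMap]
  apply List.flatMap_congr
  intro k _
  rw [List.map_map]
  exact pv_enum_filter_map l2m _ 0

def pvCs (wl : List String) (s : String) : List Int :=
  ((List.range wl.length).filter
      (fun k => (ngram_port ((wl.length - k : Nat) : Int) wl).contains s)).map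
    (fun k => ((wl.length - k : Nat) : Int))

theorem pv_nodup_Cs (wl : List String) (s : String) : (pvCs wl s).Nodup := by
  unfold pvCs
  apply List.Nodup.map_on
  · intro x hx y hy hxy
    simp only [List.mem_filter, List.mem_range] at hx hy
    have : wl.length - x = wl.length - y := by exact_mod_cast hxy
    omega
  · exact List.Nodup.filter _ (List.nodup_range)

theorem pv_mem_Cs (wl : List String) (s : String) (x : Int) :
    x ∈ pvCs wl s ↔ ∃ i C : Nat, 1 ≤ C ∧ i + C ≤ wl.length ∧ x = (C : Int) ∧ s = pvWj wl i C := by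
  unfold pvCs
  simp only [List.mem_map, List.mem_filter, List.mem_range]
  constructor
  · rintro ⟨k, ⟨hk, hc⟩, rfl⟩
    rw [List.contains_iff_mem, pv_mem_ngram wl (wl.length - k) (by omega) s] at hc
    obtain ⟨i, hi, rfl⟩ := hc
    exact ⟨i, wl.length - k, by omega, hi, rfl, rfl⟩
  · rintro ⟨i, C, h1, h2, rfl, rfl⟩
    refine ⟨wl.length - C, ⟨by omega, ?_⟩, by rw [show wl.length - (wl.length - C) = C by omega]⟩
    rw [List.contains_iff_mem, show wl.length - (wl.length - C) = C by omega,
      pv_mem_ngram wl C (by omega)]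
    exact ⟨i, h2, rfl⟩

theorem pv_perm_lens_Cs (wl : List String) (s : String) :
    ((pvLens wl).getD s PySem.Set.empty : List Int).Perm (pvCs wl s) := by
  rw [List.perm_ext_iff_of_nodup (pv_nodup_lens wl s) (pv_nodup_Cs wl s)]
  intro x
  rw [pv_mem_lens, pv_mem_Cs]

theorem pv_perm_trips_T (wl l2m : List String) : (pvTrips wl l2m).Perm (pvT wl l2m) := by
  have h1 : ∀ p : Int × String,
      (((pvLens wl).getD p.2 PySem.Set.empty).map (fun C => (C, p.1, p.2))).Perm
        ((List.range wl.length).flatMap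
          (fun k => if (ngram_port ((wl.length - k : Nat) : Int) wl).contains p.2 = true
            then [(((wl.length - k : Nat) : Int), p.1, p.2)] else [])) := by
    intro p
    have hperm := (pv_perm_lens_Cs wl p.2).map (fun C => (C, p.1, p.2))
    have heq : (pvCs wl p.2).map (fun C => (C, p.1, p.2))
        = (List.range wl.length).flatMap
          (fun k => if (ngram_port ((wl.length - k : Nat) : Int) wl).contains p.2 = true
            then [(((wl.length - k : Nat) : Int), p.1, p.2)] else []) := by
      unfold pvCs
      rw [List.map_map, pv_filter_map_eq_flatMap]
      rfl
    rw [heq] at hperm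
    exact hperm
  have h2 : ∀ k : Nat,
      ((PySem.List.enumerate l2m).filter
          (fun p => (ngram_port ((wl.length - k : Nat) : Int) wl).contains p.2)).map
        (fun p => (((wl.length - k : Nat) : Int), p.1, p.2))
        = (PySem.List.enumerate l2m).flatMap
            (fun p => if (ngram_port ((wl.length - k : Nat) : Int) wl).contains p.2 = true
              then [(((wl.length - k : Nat) : Int), p.1, p.2)] else []) := by
    intro k
    rw [pv_filter_map_eq_flatMap]
  rw [← Multiset.coe_eq_coe]
  unfold pvTrips pvT
  rw [← Multiset.coe_bind, ← Multiset.coe_bind]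
  trans ((PySem.List.enumerate l2m : Multiset (Int × String)).bind
      (fun p => ((List.range wl.length).flatMap
        (fun k => if (ngram_port ((wl.length - k : Nat) : Int) wl).contains p.2 = true
          then [(((wl.length - k : Nat) : Int), p.1, p.2)] else []) : List (Int × Int × String))))
  · exact Multiset.bind_congr (fun p _ => (Multiset.coe_eq_coe).2 (h1 p))
  trans ((List.range wl.length : Multiset Nat).bind
      (fun k => ((PySem.List.enumerate l2m).flatMap
        (fun p => if (ngram_port ((wl.length - k : Nat) : Int) wl).contains p.2 = true
          then [(((wl.length - k : Nat) : Int), p.1, p.2)] else []) : List (Int × Int × String))))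
  · simp only [← Multiset.coe_bind]
    exact Multiset.bind_bind _ _
  · exact Multiset.bind_congr (fun k _ => congrArg (fun (l : List (Int × Int × String)) => (l : Multiset (Int × Int × String))) (h2 k).symm)

theorem pv_pairwise_T (wl l2m : List String) :
    (pvT wl l2m).Pairwise
      (fun a b => (toLex (-a.1, a.2.1) : Int ×ₗ Int) < toLex (-b.1, b.2.1)) := by
  unfold pvT
  have hblk : ∀ k : Nat,
      (((PySem.List.enumerate l2m).filter
          (fun p => (ngram_port ((wl.length - k : Nat) : Int) wl).contains p.2)).map
        (fun p => (((wl.length - k : Nat) : Int), p.1, p.2))).Pairwise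
        (fun a b => (toLex (-a.1, a.2.1) : Int ×ₗ Int) < toLex (-b.1, b.2.1)) := by
    intro k
    rw [List.pairwise_map]
    apply List.Pairwise.filter
    apply (PySem.List.pairwise_lt_enumerate l2m 0).imp
    intro p q hpq
    rw [Prod.Lex.lt_iff]
    right
    exact ⟨rfl, hpq⟩
  have hmem : ∀ (k : Nat) (t : Int × Int × String),
      t ∈ ((PySem.List.enumerate l2m).filter
          (fun p => (ngram_port ((wl.length - k : Nat) : Int) wl).contains p.2)).map
        (fun p => (((wl.length - k : Nat) : Int), p.1, p.2)) → t.1 = ((wl.length - k : Nat) : Int) := by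
    intro k t ht
    obtain ⟨p, _, rfl⟩ := List.mem_map.1 ht
    rfl
  suffices h : ∀ N : Nat, N ≤ wl.length →
      ((List.range N).flatMap (fun k =>
        ((PySem.List.enumerate l2m).filter
            (fun p => (ngram_port ((wl.length - k : Nat) : Int) wl).contains p.2)).map
          (fun p => (((wl.length - k : Nat) : Int), p.1, p.2)))).Pairwise
        (fun a b => (toLex (-a.1, a.2.1) : Int ×ₗ Int) < toLex (-b.1, b.2.1)) by
    exact h wl.length le_rfl
  intro N
  induction N with
  | zero => intro _; simp
  | succ N ih =>
    intro hN
    rw [List.range_succ, List.flatMap_append, List.pairwise_append]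
    refine ⟨ih (by omega), by simpa using hblk N, ?_⟩
    intro a ha b hb
    simp only [List.flatMap_cons, List.flatMap_nil, List.append_nil] at hb
    obtain ⟨k, hk, hak⟩ := List.mem_flatMap.1 ha
    have ha1 := hmem k a hak
    have hb1 := hmem N b hb
    rw [List.mem_range] at hk
    rw [Prod.Lex.lt_iff]
    simp only [ofLex_toLex]
    left
    rw [ha1, hb1]
    have h1 : wl.length - k > wl.length - N := by omega
    have : ((wl.length - N : Nat) : Int) < ((wl.length - k : Nat) : Int) := by exact_mod_cast h1
    omega

theorem pv_sorted_trips (wl l2m : List String) :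
    PySem.List.sorted2 (pvTrips wl l2m) (fun t => -t.1) (fun t => t.2.1) = pvT wl l2m := by
  rw [pv_sorted2_eq_sorted]
  exact PySem.List.sorted_eq_of_perm_of_pairwise_lt _ _ _ (pv_perm_trips_T wl l2m).symm
    (pv_pairwise_T wl l2m)

-- ===== VERDICT (by name: the statement is the Claim_ definition above) =====
theorem get_full_match_spec : Claim_equal_get_full_match := by
  intro wl l2m _
  unfold Spec_get_full_match
  rw [pv_A_out, pv_B_out, pv_sorted_trips, pv_T_map]
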